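-- pv_equiv track=rewrite | github.com/icai-uma/datasetGAN2_release | datasetGAN2/interpreter_cross_validation.py | gen_cross_val_chunk_list
-- ===== SOURCE A (Python) =====
-- def gen_cross_val_chunk_list(fold, num_chunks):
--     """Function to generate train and validation chunks indexes taking as input
--     on the fold and the number of chunks. It returns the list of image indexes
--     to be used for training and the list of image indexes to be used for validation."""
--     chunk_list_train = []
--     chunk_list_validation = []
--     count = 0
--     for i in range(4):
--         for j in range(int(num_chunks/4)):
--             if i == fold: chunk_list_validation.append(count)
--             else: chunk_list_train.append(count)
--             count+=1
--     return chunk_list_train, chunk_list_validation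
-- ===== SOURCE B (Python) =====
-- def gen_cross_val_chunk_list(fold, num_chunks):
--     """Build the fold's validation block and its complement directly from
--     ranges over the index space, with no per-element loop or branch."""
--     q = max(num_chunks // 4, 0)
--     n = 4 * q
--     if fold in (0, 1, 2, 3):
--         s = fold * q
--         return list(range(0, s)) + list(range(s + q, n)), list(range(s, s + q))
--     return list(range(n)), []
-- ===== Notes on version B (the rewrite author's own statement) =====
-- stated objective: simpler
-- what changed: Replaces the 4xq per-element loop with per-index branching by direct range construction: validation is the contiguous block [fold*q, fold*q+q) and train its complement (or the full range for an out-of-range fold).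
import Mathlib
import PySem

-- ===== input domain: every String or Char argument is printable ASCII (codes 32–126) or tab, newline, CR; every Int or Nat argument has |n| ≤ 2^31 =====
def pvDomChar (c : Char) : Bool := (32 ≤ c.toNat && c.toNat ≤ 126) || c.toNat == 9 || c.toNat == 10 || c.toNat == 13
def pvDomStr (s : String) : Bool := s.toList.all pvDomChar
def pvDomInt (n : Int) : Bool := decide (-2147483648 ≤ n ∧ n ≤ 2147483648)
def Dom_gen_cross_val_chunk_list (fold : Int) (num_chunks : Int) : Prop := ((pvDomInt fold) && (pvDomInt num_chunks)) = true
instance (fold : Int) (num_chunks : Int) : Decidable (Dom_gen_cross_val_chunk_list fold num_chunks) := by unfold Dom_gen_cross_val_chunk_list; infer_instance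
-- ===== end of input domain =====

-- B builds the validation block and its complementary train ranges directly,
-- instead of A's 4×q per-element loop with a branch (objective: simpler).

-- ===== PORT A =====
-- int(num_chunks/4): true division, then int() truncates toward zero; on |num_chunks| ≤ 2^31
-- the float quotient is exact, so this is exactly Int.tdiv num_chunks 4.
def gen_cross_val_chunk_list (fold : Int) (num_chunks : Int) : List Int × List Int :=
  -- Python lists are dynamic arrays; list.append is Array.push.
  let st :=
    (PySem.List.pyRange 0 4 1).foldl (fun st i =>
      (PySem.List.pyRange 0 (Int.tdiv num_chunks 4) 1).foldl (fun st _j =>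
        if i == fold then (st.1, st.2.1.push st.2.2, st.2.2 + 1)
        else (st.1.push st.2.2, st.2.1, st.2.2 + 1)) st)
      ((#[] : Array Int), (#[] : Array Int), (0 : Int))
  (st.1.toList, st.2.1.toList)

-- ===== PORT B =====
def gen_cross_val_chunk_list_alt (fold : Int) (num_chunks : Int) : List Int × List Int :=
  let q := max (PySem.Int.floordiv num_chunks 4) 0
  let n := 4 * q
  if fold = 0 ∨ fold = 1 ∨ fold = 2 ∨ fold = 3 then
    let s := fold * q
    (PySem.List.pyRange 0 s 1 ++ PySem.List.pyRange (s + q) n 1,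
     PySem.List.pyRange s (s + q) 1)
  else
    (PySem.List.pyRange 0 n 1, ([] : List Int))

-- ===== PRECONDITION & SPEC =====
def Spec_gen_cross_val_chunk_list (fold : Int) (num_chunks : Int) (out : List Int × List Int) : Prop := out = gen_cross_val_chunk_list_alt fold num_chunks
instance (fold : Int) (num_chunks : Int) (out : List Int × List Int) : Decidable (Spec_gen_cross_val_chunk_list fold num_chunks out) := by unfold Spec_gen_cross_val_chunk_list; infer_instance

-- ===== CLAIM (what is proved, stated in full; the proofs are below) =====
def Claim_equal_gen_cross_val_chunk_list : Prop := ∀ (fold : Int) (num_chunks : Int), Dom_gen_cross_val_chunk_list fold num_chunks → Spec_gen_cross_val_chunk_list fold num_chunks (gen_cross_val_chunk_list fold num_chunks)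

-- ===== LEMMAS AND PROOFS =====

-- The inner loop when the branch never fires (i ≠ fold): appends count, count+1, … to train.
theorem pv_inner_train (i fold : Int) (h : (i == fold) = false) :
    ∀ (L : List Int) (tr va : Array Int) (c : Int),
      L.foldl (fun st _j =>
        if i == fold then (st.1, st.2.1.push st.2.2, st.2.2 + 1)
        else (st.1.push st.2.2, st.2.1, st.2.2 + 1)) (tr, va, c)
      = ((tr.toList ++ PySem.List.pyRange c (c + L.length) 1).toArray, va, c + L.length) := by
  intro L
  induction L with
  | nil => intro tr va c; simp [PySem.List.pyRange_one_eq_nil]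
  | cons x L ih =>
      intro tr va c
      simp only [h, Bool.false_eq_true, if_false] at ih
      simp only [List.foldl_cons, h, Bool.false_eq_true, if_false]
      rw [ih (tr.push c) va (c + 1)]
      rw [show (c + ((x :: L).length : Int)) = (c + 1) + (L.length : Int) by push_cast [List.length_cons]; ring]
      rw [PySem.List.pyRange_one_cons (by omega : c < (c + 1) + (L.length : Int))]
      simp

-- The inner loop when the branch always fires (i = fold): appends to validation.
theorem pv_inner_val (i fold : Int) (h : (i == fold) = true) :
    ∀ (L : List Int) (tr va : Array Int) (c : Int),
      L.foldl (fun st _j =>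
        if i == fold then (st.1, st.2.1.push st.2.2, st.2.2 + 1)
        else (st.1.push st.2.2, st.2.1, st.2.2 + 1)) (tr, va, c)
      = (tr, (va.toList ++ PySem.List.pyRange c (c + L.length) 1).toArray, c + L.length) := by
  intro L
  induction L with
  | nil => intro tr va c; simp [PySem.List.pyRange_one_eq_nil]
  | cons x L ih =>
      intro tr va c
      simp only [h, if_true] at ih
      simp only [List.foldl_cons, h, if_true]
      rw [ih tr (va.push c) (c + 1)]
      rw [show (c + ((x :: L).length : Int)) = (c + 1) + (L.length : Int) by push_cast [List.length_cons]; ring]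
      rw [PySem.List.pyRange_one_cons (by omega : c < (c + 1) + (L.length : Int))]
      simp

-- Python's max(num_chunks // 4, 0) equals the inner-loop length int(num_chunks/4) clamped at 0.
theorem pv_q_eq (n : Int) :
    max (PySem.Int.floordiv n 4) 0 = (((Int.tdiv n 4 - 0).toNat : Nat) : Int) := by
  rw [PySem.Int.floordiv_eq_ediv_of_pos (by norm_num)]
  cases n with
  | ofNat m =>
      have h : Int.tdiv (Int.ofNat m) 4 = Int.ofNat (m / 4) := rfl
      rw [h]; simp only [Int.ofNat_eq_natCast]; omega
  | negSucc m =>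
      have h : Int.tdiv (Int.negSucc m) 4 = -Int.ofNat ((m + 1) / 4) := rfl
      rw [h]; simp only [Int.ofNat_eq_natCast]; omega

theorem pv_main (fold num_chunks : Int) :
    gen_cross_val_chunk_list fold num_chunks = gen_cross_val_chunk_list_alt fold num_chunks := by
  unfold gen_cross_val_chunk_list gen_cross_val_chunk_list_alt
  have h4 : PySem.List.pyRange 0 4 1 = [0, 1, 2, 3] := by decide
  rw [h4]
  set L := PySem.List.pyRange 0 (Int.tdiv num_chunks 4) 1 with hL
  have hq : max (PySem.Int.floordiv num_chunks 4) 0 = ((L.length : Nat) : Int) := by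
    rw [pv_q_eq, hL, PySem.List.length_pyRange_one]
  set K : Int := ((L.length : Nat) : Int) with hK
  have hK0 : 0 ≤ K := by rw [hK]; exact Int.natCast_nonneg _
  simp only [List.foldl_cons, List.foldl_nil, hq]
  by_cases h0 : fold = 0
  · subst h0
    rw [pv_inner_val 0 0 (by decide) L, pv_inner_train 1 0 (by decide) L,
        pv_inner_train 2 0 (by decide) L, pv_inner_train 3 0 (by decide) L]
    have hc : (0:Int) = 0 ∨ (0:Int) = 1 ∨ (0:Int) = 2 ∨ (0:Int) = 3 := Or.inl rfl
    rw [if_pos hc, ← hK]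
    rw [show (0:Int) * K = 0 by ring, show (0:Int) + K = K by ring]
    simp only [List.nil_append]
    rw [← PySem.List.pyRange_one_append K (K + K) (K + K + K) (by omega) (by omega)]
    rw [← PySem.List.pyRange_one_append K (K + K + K) (K + K + K + K) (by omega) (by omega)]
    rw [show (4:Int) * K = K + K + K + K by ring]
    rw [PySem.List.pyRange_one_eq_nil (le_refl (0:Int))]
    all_goals simp
  by_cases h1 : fold = 1
  · subst h1
    rw [pv_inner_train 0 1 (by decide) L, pv_inner_val 1 1 (by decide) L,
        pv_inner_train 2 1 (by decide) L, pv_inner_train 3 1 (by decide) L]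
    have hc : (1:Int) = 0 ∨ (1:Int) = 1 ∨ (1:Int) = 2 ∨ (1:Int) = 3 := Or.inr (Or.inl rfl)
    rw [if_pos hc, ← hK]
    rw [show (0:Int) + K = K by ring, show (1:Int) * K = K by ring]
    simp only [List.nil_append]
    rw [List.append_assoc]
    rw [← PySem.List.pyRange_one_append (K + K) (K + K + K) (K + K + K + K) (by omega) (by omega)]
    rw [show (4:Int) * K = K + K + K + K by ring]
  by_cases h2 : fold = 2
  · subst h2
    rw [pv_inner_train 0 2 (by decide) L, pv_inner_train 1 2 (by decide) L,
        pv_inner_val 2 2 (by decide) L, pv_inner_train 3 2 (by decide) L]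
    have hc : (2:Int) = 0 ∨ (2:Int) = 1 ∨ (2:Int) = 2 ∨ (2:Int) = 3 := Or.inr (Or.inr (Or.inl rfl))
    rw [if_pos hc, ← hK]
    rw [show (0:Int) + K = K by ring, show (2:Int) * K = K + K by ring]
    simp only [List.nil_append]
    rw [← PySem.List.pyRange_one_append 0 K (K + K) (by omega) (by omega)]
    rw [show (4:Int) * K = K + K + K + K by ring]
  by_cases h3 : fold = 3
  · subst h3
    rw [pv_inner_train 0 3 (by decide) L, pv_inner_train 1 3 (by decide) L,
        pv_inner_train 2 3 (by decide) L, pv_inner_val 3 3 (by decide) L]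
    have hc : (3:Int) = 0 ∨ (3:Int) = 1 ∨ (3:Int) = 2 ∨ (3:Int) = 3 := Or.inr (Or.inr (Or.inr rfl))
    rw [if_pos hc, ← hK]
    rw [show (0:Int) + K = K by ring, show (3:Int) * K = K + K + K by ring]
    simp only [List.nil_append]
    rw [← PySem.List.pyRange_one_append 0 K (K + K) (by omega) (by omega)]
    rw [← PySem.List.pyRange_one_append 0 (K + K) (K + K + K) (by omega) (by omega)]
    rw [show (4:Int) * K = K + K + K + K by ring]
    rw [PySem.List.pyRange_one_eq_nil (le_refl (K + K + K + K))]
    all_goals simp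
  · rw [pv_inner_train 0 fold (by simp [Ne.symm h0]) L,
        pv_inner_train 1 fold (by simp [Ne.symm h1]) L,
        pv_inner_train 2 fold (by simp [Ne.symm h2]) L,
        pv_inner_train 3 fold (by simp [Ne.symm h3]) L]
    have hc : ¬(fold = 0 ∨ fold = 1 ∨ fold = 2 ∨ fold = 3) := by tauto
    rw [if_neg hc, ← hK]
    rw [show (0:Int) + K = K by ring]
    simp only [List.nil_append]
    rw [← PySem.List.pyRange_one_append 0 K (K + K) (by omega) (by omega)]
    rw [← PySem.List.pyRange_one_append 0 (K + K) (K + K + K) (by omega) (by omega)]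
    rw [← PySem.List.pyRange_one_append 0 (K + K + K) (K + K + K + K) (by omega) (by omega)]
    rw [show (4:Int) * K = K + K + K + K by ring]

-- ===== VERDICT (by name: the statement is the Claim_ definition above) =====
theorem gen_cross_val_chunk_list_spec : Claim_equal_gen_cross_val_chunk_list := by
  intro fold num_chunks _
  unfold Spec_gen_cross_val_chunk_list
  exact pv_main fold num_chunks
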